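-- pv_equiv track=rewrite | github.com/Afia-Anjum/NLP-Intro-Assignment-5 | assignment-5.py | split_category_texts
-- ===== SOURCE A (Python) =====
-- def split_category_texts(categories, texts):
--     tech, business, entertainment, politics, sports = ([], [], [], [], [])
--     for i in range(len(categories)):
--         category = categories[i]
--         text = texts[i]
--         if category == 'tech':
--             tech.append(text)
--         elif category == 'business':
--             business.append(text)
--         elif category == 'entertainment':
--             entertainment.append(text)
--         elif category == 'politics':
--             politics.append(text)
--         elif category == 'sport':
--             sports.append(text)
--
--     return tech, business, entertainment, politics, sports
-- ===== SOURCE B (Python) =====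
-- def split_category_texts(categories, texts):
--     def bucket(c):
--         return [texts[i] for i in range(len(categories)) if categories[i] == c]
--     return (bucket('tech'), bucket('business'), bucket('entertainment'),
--             bucket('politics'), bucket('sport'))
-- ===== Notes on version B (the rewrite author's own statement) =====
-- stated objective: alternative
-- what changed: Replaced the single dispatch loop with five accumulators by five independent index-based filtering comprehensions, one per bucket.
import Mathlib
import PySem

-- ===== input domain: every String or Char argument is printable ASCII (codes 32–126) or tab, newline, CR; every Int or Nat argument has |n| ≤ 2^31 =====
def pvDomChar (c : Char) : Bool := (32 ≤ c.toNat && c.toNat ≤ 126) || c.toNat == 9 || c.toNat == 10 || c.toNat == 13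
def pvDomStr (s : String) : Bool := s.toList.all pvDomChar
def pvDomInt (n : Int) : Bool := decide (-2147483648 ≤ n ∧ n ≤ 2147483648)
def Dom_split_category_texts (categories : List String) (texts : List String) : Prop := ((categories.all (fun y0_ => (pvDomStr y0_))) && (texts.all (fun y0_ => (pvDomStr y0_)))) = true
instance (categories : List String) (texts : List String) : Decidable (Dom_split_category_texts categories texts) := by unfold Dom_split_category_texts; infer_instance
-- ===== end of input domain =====

-- B replaces A's single dispatch loop (five accumulators, one pass) by five independent
-- index-based filtering passes, one per bucket; same cost class, different decomposition.


-- ===== PORT A =====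
-- A: one loop over range(len(categories)); texts[i] fetched unconditionally (raises if
-- texts is shorter — excluded by Pre_; here .getD "" stands for the successful lookup).
def split_category_texts (categories : List String) (texts : List String) : List String × List String × List String × List String × List String :=
  (PySem.List.pyRange 0 categories.length 1).foldl
    (fun acc i =>
      let category := (PySem.List.pyGet? categories i).getD ""
      let text := (PySem.List.pyGet? texts i).getD ""
      if category == "tech" then (acc.1 ++ [text], acc.2.1, acc.2.2.1, acc.2.2.2.1, acc.2.2.2.2)
      else if category == "business" then (acc.1, acc.2.1 ++ [text], acc.2.2.1, acc.2.2.2.1, acc.2.2.2.2)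
      else if category == "entertainment" then (acc.1, acc.2.1, acc.2.2.1 ++ [text], acc.2.2.2.1, acc.2.2.2.2)
      else if category == "politics" then (acc.1, acc.2.1, acc.2.2.1, acc.2.2.2.1 ++ [text], acc.2.2.2.2)
      else if category == "sport" then (acc.1, acc.2.1, acc.2.2.1, acc.2.2.2.1, acc.2.2.2.2 ++ [text])
      else acc)
    ([], [], [], [], [])

-- ===== PORT B =====
-- B's comprehension [texts[i] for i in range(len(categories)) if categories[i] == c]
def pvBucket (categories : List String) (texts : List String) (c : String) : List String :=
  ((PySem.List.pyRange 0 categories.length 1).filter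
      (fun i => (PySem.List.pyGet? categories i).getD "" == c)).map
    (fun i => (PySem.List.pyGet? texts i).getD "")

def split_category_texts_alt (categories : List String) (texts : List String) : List String × List String × List String × List String × List String :=
  (pvBucket categories texts "tech", pvBucket categories texts "business",
   pvBucket categories texts "entertainment", pvBucket categories texts "politics",
   pvBucket categories texts "sport")

-- ===== PRECONDITION & SPEC =====
-- Pre_ excludes texts shorter than categories: there the Python A raises IndexError on texts[i].
def Pre_split_category_texts (categories : List String) (texts : List String) : Prop := categories.length ≤ texts.length
instance (categories : List String) (texts : List String) : Decidable (Pre_split_category_texts categories texts) := by unfold Pre_split_category_texts; infer_instance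
def pvWitness_split_category_texts : List String × List String := (["tech", "sport", "junk"], ["a", "b", "c"])
def Spec_split_category_texts (categories : List String) (texts : List String) (out : List String × List String × List String × List String × List String) : Prop := out = split_category_texts_alt categories texts
instance (categories : List String) (texts : List String) (out : List String × List String × List String × List String × List String) : Decidable (Spec_split_category_texts categories texts out) := by unfold Spec_split_category_texts; infer_instance

-- ===== CLAIM (what is proved, stated in full; the proofs are below) =====
def Claim_equal_split_category_texts : Prop := ∀ (categories : List String) (texts : List String), Dom_split_category_texts categories texts → Pre_split_category_texts categories texts → Spec_split_category_texts categories texts (split_category_texts categories texts)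

-- ===== LEMMAS AND PROOFS =====

-- the per-bucket filter/map of B restricted to an arbitrary index list
def pvBucketOn (categories : List String) (texts : List String) (c : String) (L : List Int) : List String :=
  (L.filter (fun i => (PySem.List.pyGet? categories i).getD "" == c)).map
    (fun i => (PySem.List.pyGet? texts i).getD "")

lemma foldl_buckets (categories texts : List String) (L : List Int)
    (acc : List String × List String × List String × List String × List String) :
    L.foldl
      (fun acc i =>
        let category := (PySem.List.pyGet? categories i).getD ""
        let text := (PySem.List.pyGet? texts i).getD ""
        if category == "tech" then (acc.1 ++ [text], acc.2.1, acc.2.2.1, acc.2.2.2.1, acc.2.2.2.2)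
        else if category == "business" then (acc.1, acc.2.1 ++ [text], acc.2.2.1, acc.2.2.2.1, acc.2.2.2.2)
        else if category == "entertainment" then (acc.1, acc.2.1, acc.2.2.1 ++ [text], acc.2.2.2.1, acc.2.2.2.2)
        else if category == "politics" then (acc.1, acc.2.1, acc.2.2.1, acc.2.2.2.1 ++ [text], acc.2.2.2.2)
        else if category == "sport" then (acc.1, acc.2.1, acc.2.2.1, acc.2.2.2.1, acc.2.2.2.2 ++ [text])
        else acc)
      acc
    = (acc.1 ++ pvBucketOn categories texts "tech" L,
       acc.2.1 ++ pvBucketOn categories texts "business" L,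
       acc.2.2.1 ++ pvBucketOn categories texts "entertainment" L,
       acc.2.2.2.1 ++ pvBucketOn categories texts "politics" L,
       acc.2.2.2.2 ++ pvBucketOn categories texts "sport" L) := by
  induction L generalizing acc with
  | nil => simp [pvBucketOn]
  | cons i L ih =>
    rw [List.foldl_cons, ih]
    by_cases h1 : (PySem.List.pyGet? categories i).getD "" = "tech"
    · simp [pvBucketOn, h1]
    by_cases h2 : (PySem.List.pyGet? categories i).getD "" = "business"
    · simp [pvBucketOn, h2]
    by_cases h3 : (PySem.List.pyGet? categories i).getD "" = "entertainment"
    · simp [pvBucketOn, h3]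
    by_cases h4 : (PySem.List.pyGet? categories i).getD "" = "politics"
    · simp [pvBucketOn, h4]
    by_cases h5 : (PySem.List.pyGet? categories i).getD "" = "sport"
    · simp [pvBucketOn, h5]
    · simp [pvBucketOn, h1, h2, h3, h4, h5]

-- ===== VERDICT (by name: the statement is the Claim_ definition above) =====
theorem split_category_texts_spec : Claim_equal_split_category_texts := by
  intro categories texts _ _
  unfold Spec_split_category_texts split_category_texts split_category_texts_alt pvBucket
  rw [foldl_buckets]
  simp [pvBucketOn]
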